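-- pv_equiv track=rewrite | github.com/pFransozi/advent-of-code-2024 | code_day02.py | analize_data_parte2
-- ===== SOURCE A (Python) =====
-- def is_asc(data):
--     return all(i < j for i, j in data)
--
-- def is_desc(data):
--     return all( i > j for i, j in data)
--
-- def calc_subs(data):
--     return [i - j for i, j in data]
--
-- def eval_subs(data):
--     count = 0
--     for item in data:
--         if not 1 <= abs(item) <= 3:
--             count = count + 1
--
--     return count
--
-- def analize_data_parte1(data):
--
--     data_tuplas = list(zip(data, data[1:]))
--
--     asc = is_asc(data_tuplas)
--     desc = is_desc(data_tuplas)
--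
--     if not asc and not desc:
--         return False
--
--     subs = calc_subs(data_tuplas)
--     subs_result = eval_subs(subs)
--     diffs_ok = subs_result == 0
--
--     return True if diffs_ok else False
--
-- def analize_data_parte2(data):
--     tmp = []
--     tmp_parte_1 = False
--     for i in range(len(data) + 1):
--         tmp = data[:i] + data[i+1:]
--         tmp_parte_1 = analize_data_parte1(tmp)
--
--         if tmp_parte_1:
--             return tmp_parte_1
--
--     if not tmp_parte_1:
--         return tmp_parte_1
-- ===== SOURCE B (Python) =====
-- def analize_data_parte2(data):
--     # O(n): a safe report after (at most) one removal must be repaired at the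
--     # first out-of-band adjacent pair, so only those two removals (per direction)
--     # need to be tried, besides the untouched list.
--     def safe_dir(xs, sign):
--         return all(1 <= (b - a) * sign <= 3 for a, b in zip(xs, xs[1:]))
--
--     def first_bad(sign):
--         k = 0
--         for a, b in zip(data, data[1:]):
--             if not 1 <= (b - a) * sign <= 3:
--                 return k
--             k += 1
--         return None
--
--     if safe_dir(data, 1) or safe_dir(data, -1):
--         return True
--
--     cands = []
--     for sign in (1, -1):
--         k = first_bad(sign)
--         if k is not None:
--             for c in (k, k + 1):
--                 if c not in cands:
--                     cands.append(c)
--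
--     return any(safe_dir(data[:i] + data[i + 1:], 1) or
--                safe_dir(data[:i] + data[i + 1:], -1)
--                for i in cands)
-- ===== Notes on version B (the rewrite author's own statement) =====
-- stated objective: faster
-- what changed: A re-tests every single-element deletion with the full monotone/step check (O(n^2)); B checks the untouched list once and, if it fails, tries only the two deletions around the first out-of-band adjacent pair of each direction, so at most four O(n) deletion checks (O(n)).
import Mathlib
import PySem

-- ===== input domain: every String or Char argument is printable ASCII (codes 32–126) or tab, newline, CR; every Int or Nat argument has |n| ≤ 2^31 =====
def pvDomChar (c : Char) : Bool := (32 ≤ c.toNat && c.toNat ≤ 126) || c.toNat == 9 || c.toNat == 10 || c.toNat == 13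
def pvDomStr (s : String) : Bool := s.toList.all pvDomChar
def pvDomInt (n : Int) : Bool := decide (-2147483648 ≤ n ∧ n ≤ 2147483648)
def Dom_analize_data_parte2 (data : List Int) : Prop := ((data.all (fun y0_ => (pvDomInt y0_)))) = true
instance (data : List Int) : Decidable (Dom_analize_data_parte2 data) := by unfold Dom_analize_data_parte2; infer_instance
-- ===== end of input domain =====

-- B replaces A's try-every-deletion O(n^2) scan by an O(n) check of the two
-- deletions around the first out-of-band adjacent pair of each direction.

-- ===== PORT A =====
def is_asc (l : List (Int × Int)) : Bool := l.all (fun p => decide (p.1 < p.2))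
def is_desc (l : List (Int × Int)) : Bool := l.all (fun p => decide (p.1 > p.2))
def calc_subs (l : List (Int × Int)) : List Int := l.map (fun p => p.1 - p.2)
def eval_subs (l : List Int) : Int :=
  l.foldl (fun count item => if ¬ (1 ≤ |item| ∧ |item| ≤ 3) then count + 1 else count) 0

def analize_data_parte1 (data : List Int) : Bool :=
  let data_tuplas := data.zip (PySem.List.slice data (some 1) none)
  let asc := is_asc data_tuplas
  let desc := is_desc data_tuplas
  if !asc && !desc then false
  else
    let subs := calc_subs data_tuplas
    let subs_result := eval_subs subs
    let diffs_ok := subs_result == 0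
    if diffs_ok then true else false

-- data[:i] + data[i+1:]
def pvDel (data : List Int) (i : Int) : List Int :=
  PySem.List.slice data none (some i) ++ PySem.List.slice data (some (i + 1)) none

-- the for-loop of A with its early return
def pvParte2Loop (data : List Int) : List Int → Bool
  | [] => false
  | i :: rest =>
    if analize_data_parte1 (pvDel data i) then true
    else pvParte2Loop data rest

def analize_data_parte2 (data : List Int) : Bool :=
  pvParte2Loop data (PySem.List.pyRange 0 ((data.length : Int) + 1) 1)

-- ===== PORT B =====
def pvOkB (a b sign : Int) : Bool := decide (1 ≤ (b - a) * sign) && decide ((b - a) * sign ≤ 3)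

def pvSafeDir (xs : List Int) (sign : Int) : Bool :=
  (xs.zip (PySem.List.slice xs (some 1) none)).all (fun p => pvOkB p.1 p.2 sign)

def pvFirstBadAux (sign : Int) : Int → List (Int × Int) → Option Int
  | _, [] => none
  | k, p :: rest => if pvOkB p.1 p.2 sign then pvFirstBadAux sign (k + 1) rest else some k

def pvFirstBad (data : List Int) (sign : Int) : Option Int :=
  pvFirstBadAux sign 0 (data.zip (PySem.List.slice data (some 1) none))

def pvAddCand (cands : List Int) (c : Int) : List Int :=
  if c ∈ cands then cands else cands ++ [c]

def analize_data_parte2_alt (data : List Int) : Bool :=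
  if pvSafeDir data 1 || pvSafeDir data (-1) then true
  else
    let cands := [(1 : Int), -1].foldl (fun cs sign =>
      match pvFirstBad data sign with
      | none => cs
      | some k => pvAddCand (pvAddCand cs k) (k + 1)) []
    cands.any (fun i => pvSafeDir (pvDel data i) 1 || pvSafeDir (pvDel data i) (-1))

-- ===== PRECONDITION & SPEC =====
def Spec_analize_data_parte2 (data : List Int) (out : Bool) : Prop := out = analize_data_parte2_alt data
instance (data : List Int) (out : Bool) : Decidable (Spec_analize_data_parte2 data out) := by unfold Spec_analize_data_parte2; infer_instance

-- ===== CLAIM (what is proved, stated in full; the proofs are below) =====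
def Claim_equal_analize_data_parte2 : Prop := ∀ (data : List Int), Dom_analize_data_parte2 data → Spec_analize_data_parte2 data (analize_data_parte2 data)

-- ===== LEMMAS AND PROOFS =====

lemma pvOkB_one_iff {a b : Int} : pvOkB a b 1 = true ↔ a < b ∧ 1 ≤ |a - b| ∧ |a - b| ≤ 3 := by
  simp only [pvOkB, mul_one, Bool.and_eq_true, decide_eq_true_eq]
  rcases abs_cases (a - b) with ⟨he, _⟩ | ⟨he, _⟩ <;> rw [he] <;> omega

lemma pvOkB_neg_one_iff {a b : Int} : pvOkB a b (-1) = true ↔ a > b ∧ 1 ≤ |a - b| ∧ |a - b| ≤ 3 := by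
  simp only [pvOkB, mul_neg_one, Bool.and_eq_true, decide_eq_true_eq]
  rcases abs_cases (a - b) with ⟨he, _⟩ | ⟨he, _⟩ <;> rw [he] <;> omega

lemma eval_subs_aux (l : List Int) : ∀ c : Int,
    c ≤ l.foldl (fun count item => if ¬ (1 ≤ |item| ∧ |item| ≤ 3) then count + 1 else count) c ∧
    (l.foldl (fun count item => if ¬ (1 ≤ |item| ∧ |item| ≤ 3) then count + 1 else count) c = c
      ↔ ∀ x ∈ l, 1 ≤ |x| ∧ |x| ≤ 3) := by
  induction l with
  | nil => intro c; simp
  | cons a t ih =>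
    intro c
    simp only [List.foldl_cons]
    by_cases h : 1 ≤ |a| ∧ |a| ≤ 3
    · rw [if_neg (by simpa using h)]
      obtain ⟨hle, hiff⟩ := ih c
      refine ⟨hle, ?_⟩
      rw [hiff]
      constructor
      · rintro hall x hx
        rcases List.mem_cons.mp hx with rfl | hx
        · exact h
        · exact hall x hx
      · intro hall x hx
        exact hall x (List.mem_cons_of_mem _ hx)
    · rw [if_pos (by simpa using h)]
      obtain ⟨hle, _⟩ := ih (c + 1)
      refine ⟨by omega, ?_⟩
      constructor
      · intro heq; omega
      · intro hall; exact absurd (hall a (List.mem_cons_self)) h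

lemma eval_subs_zero_iff (l : List Int) :
    eval_subs l = 0 ↔ ∀ x ∈ l, 1 ≤ |x| ∧ |x| ≤ 3 := (eval_subs_aux l 0).2

lemma parte1_pairs (l : List (Int × Int)) :
    (if !is_asc l && !is_desc l then false
     else if eval_subs (calc_subs l) == 0 then true else false)
    = (l.all (fun p => pvOkB p.1 p.2 1) || l.all (fun p => pvOkB p.1 p.2 (-1))) := by
  have hz : eval_subs (calc_subs l) = 0 ↔ ∀ a b : Int, (a, b) ∈ l → 1 ≤ |a - b| ∧ |a - b| ≤ 3 := by
    rw [eval_subs_zero_iff]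
    constructor
    · intro h a b hab
      exact h (a - b) (by unfold calc_subs; exact List.mem_map_of_mem hab)
    · intro h x hx
      unfold calc_subs at hx
      obtain ⟨p, hp, rfl⟩ := List.mem_map.mp hx
      exact h p.1 p.2 (by simpa using hp)
  have hasc : is_asc l = true ↔ ∀ a b : Int, (a, b) ∈ l → a < b := by
    unfold is_asc; simp
  have hdesc : is_desc l = true ↔ ∀ a b : Int, (a, b) ∈ l → b < a := by
    unfold is_desc; simp
  have hall1 : (l.all fun p => pvOkB p.1 p.2 1) = true
      ↔ ∀ a b : Int, (a, b) ∈ l → a < b ∧ 1 ≤ |a - b| ∧ |a - b| ≤ 3 := by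
    rw [List.all_eq_true]
    constructor
    · intro h a b hab; exact pvOkB_one_iff.mp (h _ hab)
    · intro h p hp; exact pvOkB_one_iff.mpr (h p.1 p.2 (by simpa using hp))
  have hallm : (l.all fun p => pvOkB p.1 p.2 (-1)) = true
      ↔ ∀ a b : Int, (a, b) ∈ l → b < a ∧ 1 ≤ |a - b| ∧ |a - b| ≤ 3 := by
    rw [List.all_eq_true]
    constructor
    · intro h a b hab; exact pvOkB_neg_one_iff.mp (h _ hab)
    · intro h p hp; exact pvOkB_neg_one_iff.mpr (h p.1 p.2 (by simpa using hp))
  rw [Bool.eq_iff_iff]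
  constructor
  · intro h
    by_cases hc : (!is_asc l && !is_desc l) = true
    · rw [if_pos hc] at h
      exact absurd h Bool.false_ne_true
    · rw [if_neg hc] at h
      have hev : eval_subs (calc_subs l) = 0 := by
        by_cases he : eval_subs (calc_subs l) = 0
        · exact he
        · rw [if_neg (by simpa using he)] at h
          exact absurd h Bool.false_ne_true
      have hor : is_asc l = true ∨ is_desc l = true := by
        rcases Bool.eq_false_or_eq_true (is_asc l) with h1 | h1
        · exact Or.inl h1
        · rcases Bool.eq_false_or_eq_true (is_desc l) with h2 | h2
          · exact Or.inr h2
          · exact absurd (by rw [h1, h2]; rfl) hc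
      rw [Bool.or_eq_true]
      rcases hor with ha | hd
      · exact Or.inl (hall1.mpr fun a b hab => ⟨hasc.mp ha a b hab, hz.mp hev a b hab⟩)
      · exact Or.inr (hallm.mpr fun a b hab => ⟨hdesc.mp hd a b hab, hz.mp hev a b hab⟩)
  · intro h
    rw [Bool.or_eq_true] at h
    rcases h with h1 | h1
    · have ha : is_asc l = true := hasc.mpr fun a b hab => (hall1.mp h1 a b hab).1
      have hev : eval_subs (calc_subs l) = 0 := hz.mpr fun a b hab => (hall1.mp h1 a b hab).2
      rw [if_neg (by rw [ha]; simp), if_pos (by simpa using hev)]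
    · have hd : is_desc l = true := hdesc.mpr fun a b hab => (hallm.mp h1 a b hab).1
      have hev : eval_subs (calc_subs l) = 0 := hz.mpr fun a b hab => (hallm.mp h1 a b hab).2
      rw [if_neg (by rw [hd]; simp), if_pos (by simpa using hev)]

lemma parte1_eq (xs : List Int) :
    analize_data_parte1 xs = (pvSafeDir xs 1 || pvSafeDir xs (-1)) := by
  simp only [analize_data_parte1, pvSafeDir]
  exact parte1_pairs _

lemma pvParte2Loop_eq_any (data : List Int) (is : List Int) :
    pvParte2Loop data is = is.any (fun i => analize_data_parte1 (pvDel data i)) := by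
  induction is with
  | nil => rfl
  | cons i rest ih =>
    simp only [pvParte2Loop, List.any_cons, ih]
    cases h : analize_data_parte1 (pvDel data i) <;> simp

lemma pvDel_eq_nat (data : List Int) (i : Nat) :
    pvDel data (i : Int) = data.take i ++ data.drop (i + 1) := by
  unfold pvDel
  rw [PySem.List.slice_to_natCast]
  have h1 : ((i : Int) + 1) = (((i + 1 : Nat)) : Int) := by push_cast; ring
  rw [h1, PySem.List.slice_from_natCast]

lemma pvDel_len (data : List Int) : pvDel data (data.length : Int) = data := by
  rw [pvDel_eq_nat]
  simp

lemma del_getElem? (data : List Int) (i j : Nat) (hi : i ≤ data.length) :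
    (data.take i ++ data.drop (i + 1))[j]? = if j < i then data[j]? else data[j + 1]? := by
  by_cases h : j < i
  · rw [if_pos h, List.getElem?_append_left (by rw [List.length_take]; omega)]
    simp [h]
  · rw [if_neg h, List.getElem?_append_right (by rw [List.length_take]; omega)]
    rw [List.length_take, List.getElem?_drop]
    congr 1
    omega

lemma safeDir_iff (xs : List Int) (s : Int) :
    pvSafeDir xs s = true ↔
      ∀ (k : Nat) (a b : Int), xs[k]? = some a → xs[k + 1]? = some b → pvOkB a b s = true := by
  unfold pvSafeDir
  rw [PySem.List.slice_from_one, List.all_eq_true]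
  constructor
  · intro h k a b hka hkb
    have hz : (xs.zip xs.tail)[k]? = some (a, b) := by
      rw [List.getElem?_zip_eq_some]
      exact ⟨hka, by rw [List.getElem?_tail]; exact hkb⟩
    exact h _ (List.mem_of_getElem? hz)
  · intro h p hp
    obtain ⟨k, hk⟩ := List.getElem?_of_mem hp
    rw [List.getElem?_zip_eq_some] at hk
    have hkb : xs[k + 1]? = some p.2 := by rw [← List.getElem?_tail]; exact hk.2
    exact h k p.1 p.2 hk.1 hkb

lemma firstBadAux_none_iff (s : Int) : ∀ (ps : List (Int × Int)) (c : Int),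
    pvFirstBadAux s c ps = none ↔ ps.all (fun p => pvOkB p.1 p.2 s) = true := by
  intro ps
  induction ps with
  | nil => intro c; simp [pvFirstBadAux]
  | cons p t ih =>
    intro c
    simp only [pvFirstBadAux, List.all_cons, Bool.and_eq_true]
    by_cases h : pvOkB p.1 p.2 s = true
    · rw [if_pos h, ih (c + 1)]
      simp [h]
    · rw [if_neg h]
      simp [h]

lemma firstBadAux_some (s : Int) : ∀ (ps : List (Int × Int)) (c k : Int),
    pvFirstBadAux s c ps = some k →
    ∃ (j : Nat) (p : Int × Int), k = c + j ∧ ps[j]? = some p ∧ pvOkB p.1 p.2 s = false := by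
  intro ps
  induction ps with
  | nil => intro c k h; simp [pvFirstBadAux] at h
  | cons p t ih =>
    intro c k h
    simp only [pvFirstBadAux] at h
    by_cases hok : pvOkB p.1 p.2 s = true
    · rw [if_pos hok] at h
      obtain ⟨j, q, hk, hq, hbad⟩ := ih (c + 1) k h
      exact ⟨j + 1, q, by omega, by simpa using hq, hbad⟩
    · rw [if_neg hok] at h
      refine ⟨0, p, ?_, by simp, Bool.eq_false_iff.mpr hok⟩
      have hck : c = k := Option.some.inj h
      rw [← hck]; simp

lemma firstBad_bad (data : List Int) (s : Int) (h : pvSafeDir data s = false) :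
    ∃ (j : Nat) (a b : Int), pvFirstBad data s = some (j : Int) ∧
      data[j]? = some a ∧ data[j + 1]? = some b ∧ pvOkB a b s = false := by
  unfold pvFirstBad
  cases hfb : pvFirstBadAux s 0 (data.zip (PySem.List.slice data (some 1) none)) with
  | none =>
    exfalso
    have := (firstBadAux_none_iff s _ 0).mp hfb
    unfold pvSafeDir at h
    rw [h] at this
    exact Bool.false_ne_true this
  | some k =>
    obtain ⟨j, p, hk, hj, hbad⟩ := firstBadAux_some s _ 0 k hfb
    rw [PySem.List.slice_from_one, List.getElem?_zip_eq_some] at hj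
    refine ⟨j, p.1, p.2, ?_, hj.1, ?_, hbad⟩
    · rw [hk]; norm_num
    · rw [← List.getElem?_tail]; exact hj.2

lemma mem_addCand (cs : List Int) (c x : Int) : x ∈ pvAddCand cs c ↔ x ∈ cs ∨ x = c := by
  unfold pvAddCand
  split_ifs with h
  · exact ⟨Or.inl, fun h' => h'.elim id (fun e => e ▸ h)⟩
  · simp

lemma main_eq (data : List Int) : analize_data_parte2 data = analize_data_parte2_alt data := by
  have hA : analize_data_parte2 data
      = (PySem.List.pyRange 0 ((data.length : Int) + 1) 1).any
          (fun i => pvSafeDir (pvDel data i) 1 || pvSafeDir (pvDel data i) (-1)) := by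
    unfold analize_data_parte2
    rw [pvParte2Loop_eq_any]
    simp only [parte1_eq]
  by_cases hS : (pvSafeDir data 1 || pvSafeDir data (-1)) = true
  · have hB : analize_data_parte2_alt data = true := by
      unfold analize_data_parte2_alt; rw [if_pos hS]
    rw [hB, hA, List.any_eq_true]
    refine ⟨(data.length : Int), ?_, ?_⟩
    · rw [PySem.List.mem_pyRange_one]
      exact ⟨Int.natCast_nonneg _, by omega⟩
    · simpa [pvDel_len] using hS
  · have hS1 : pvSafeDir data 1 = false := by
      cases h : pvSafeDir data 1 with
      | false => rfl
      | true => exact absurd (by rw [Bool.or_eq_true]; exact Or.inl h) hS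
    have hSm : pvSafeDir data (-1) = false := by
      cases h : pvSafeDir data (-1) with
      | false => rfl
      | true => exact absurd (by rw [Bool.or_eq_true]; exact Or.inr h) hS
    obtain ⟨j1, a1, b1, hfb1, hga1, hgb1, hbad1⟩ := firstBad_bad data 1 hS1
    obtain ⟨j2, a2, b2, hfb2, hga2, hgb2, hbad2⟩ := firstBad_bad data (-1) hSm
    have hB : analize_data_parte2_alt data =
        (pvAddCand (pvAddCand (pvAddCand (pvAddCand [] (j1 : Int)) ((j1 : Int) + 1)) (j2 : Int)) ((j2 : Int) + 1)).any
          (fun i => pvSafeDir (pvDel data i) 1 || pvSafeDir (pvDel data i) (-1)) := by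
      unfold analize_data_parte2_alt
      rw [if_neg (by rw [hS1, hSm]; simp)]
      simp only [List.foldl_cons, List.foldl_nil, hfb1, hfb2]
    have hlen1 : j1 + 1 < data.length := by
      rcases List.getElem?_eq_some_iff.mp hgb1 with ⟨h, -⟩; exact h
    have hlen2 : j2 + 1 < data.length := by
      rcases List.getElem?_eq_some_iff.mp hgb2 with ⟨h, -⟩; exact h
    rw [hA, hB, Bool.eq_iff_iff, List.any_eq_true, List.any_eq_true]
    constructor
    · rintro ⟨i, hmem, hgi⟩
      rw [PySem.List.mem_pyRange_one] at hmem
      have hne : i ≠ (data.length : Int) := by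
        rintro rfl
        simp only [pvDel_len] at hgi
        exact hS hgi
      have hi0 : 0 ≤ i := hmem.1
      have hilt : i.toNat < data.length := by omega
      have hicast : i = (i.toNat : Int) := by omega
      have key : ∀ (s : Int) (j : Nat) (a b : Int), data[j]? = some a → data[j + 1]? = some b →
          pvOkB a b s = false → pvSafeDir (pvDel data i) s = true →
          i = (j : Int) ∨ i = (j : Int) + 1 := by
        intro s j a b hja hjb hbad hsafe
        by_contra hcon
        rw [not_or] at hcon
        rw [hicast, pvDel_eq_nat, safeDir_iff] at hsafe
        have hne1 : i.toNat ≠ j := by omega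
        have hne2 : i.toNat ≠ j + 1 := by omega
        have hile : i.toNat ≤ data.length := by omega
        rcases Nat.lt_or_ge j i.toNat with hlt | hge
        · -- i.toNat > j + 1 : the pair survives at position j
          have h1 : (data.take i.toNat ++ data.drop (i.toNat + 1))[j]? = some a := by
            rw [del_getElem? data i.toNat j hile, if_pos (by omega)]; exact hja
          have h2 : (data.take i.toNat ++ data.drop (i.toNat + 1))[j + 1]? = some b := by
            rw [del_getElem? data i.toNat (j + 1) hile, if_pos (by omega)]; exact hjb
          have := hsafe j a b h1 h2
          rw [hbad] at this; exact Bool.false_ne_true this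
        · -- i.toNat < j : the pair survives at position j - 1
          have hj1 : 1 ≤ j := by omega
          have h1 : (data.take i.toNat ++ data.drop (i.toNat + 1))[j - 1]? = some a := by
            rw [del_getElem? data i.toNat (j - 1) hile, if_neg (by omega)]
            have : j - 1 + 1 = j := by omega
            rw [this]; exact hja
          have h2 : (data.take i.toNat ++ data.drop (i.toNat + 1))[(j - 1) + 1]? = some b := by
            rw [del_getElem? data i.toNat ((j - 1) + 1), if_neg (by omega)]
            have : j - 1 + 1 + 1 = j + 1 := by omega
            rw [this]; exact hjb
            exact hile
          have := hsafe (j - 1) a b h1 h2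
          rw [hbad] at this; exact Bool.false_ne_true this
      rw [Bool.or_eq_true] at hgi
      rcases hgi with h1 | h1
      · rcases key 1 j1 a1 b1 hga1 hgb1 hbad1 h1 with rfl | rfl
        · exact ⟨(j1 : Int), by simp [mem_addCand], by rw [Bool.or_eq_true]; exact Or.inl h1⟩
        · exact ⟨((j1 : Int) + 1), by simp [mem_addCand], by rw [Bool.or_eq_true]; exact Or.inl h1⟩
      · rcases key (-1) j2 a2 b2 hga2 hgb2 hbad2 h1 with rfl | rfl
        · exact ⟨(j2 : Int), by simp [mem_addCand], by rw [Bool.or_eq_true]; exact Or.inr h1⟩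
        · exact ⟨((j2 : Int) + 1), by simp [mem_addCand], by rw [Bool.or_eq_true]; exact Or.inr h1⟩
    · rintro ⟨c, hmem, hgc⟩
      refine ⟨c, ?_, hgc⟩
      rw [PySem.List.mem_pyRange_one]
      simp only [mem_addCand, List.not_mem_nil, false_or] at hmem
      rcases hmem with ((rfl | rfl) | rfl) | rfl <;> omega

-- ===== VERDICT (by name: the statement is the Claim_ definition above) =====
theorem analize_data_parte2_spec : Claim_equal_analize_data_parte2 := by
  intro data _
  show analize_data_parte2 data = analize_data_parte2_alt data
  exact main_eq data
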